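-- pv_equiv track=rewrite | github.com/Chaymae888/Automated-Task-Dependencies-Detection-in-User-Stories- | scripts/reflexion.py | consolidate_tasks
-- ===== SOURCE A (Python) =====
-- from typing import Any, Dict, List, Set, Tuple, Optional
--
-- def consolidate_tasks(user_stories_tasks: Dict[str, List[str]]) -> Tuple[List[str], Dict[str, List[str]]]:
--     """Fast task consolidation"""
--     unique_tasks = []
--     task_origins = {}
--     seen_tasks = set()
--
--     for user_story, tasks in user_stories_tasks.items():
--         for task in tasks:
--             task_lower = task.lower().strip()
--
--             # Simple duplicate check
--             if task_lower not in seen_tasks: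
--                 unique_tasks.append(task)
--                 seen_tasks.add(task_lower)
--                 task_origins[task] = [user_story]
--             else:
--                 # Find existing task and add origin
--                 for existing_task in unique_tasks:
--                     if existing_task.lower().strip() == task_lower:
--                         if user_story not in task_origins[existing_task]:
--                             task_origins[existing_task].append(user_story)
--                         break
--
--     return unique_tasks, task_origins
-- ===== SOURCE B (Python) =====
-- def consolidate_tasks(user_stories_tasks):
--     """Two staged passes: dedupe tasks by normalized key, then look up each task's origins."""
--     pairs = [(story, task) for story, tasks in user_stories_tasks.items() for task in tasks]
--     unique_tasks = []
--     seen = set()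
--     for _, task in pairs:
--         key = task.lower().strip()
--         if key not in seen:
--             seen.add(key)
--             unique_tasks.append(task)
--     story_keys = [(story, {x.lower().strip() for x in tasks})
--                   for story, tasks in user_stories_tasks.items()]
--     def origins(task):
--         key = task.lower().strip()
--         return [story for story, keys in story_keys if key in keys]
--     task_origins = {task: origins(task) for task in unique_tasks}
--     return unique_tasks, task_origins
-- ===== Notes on version B (the rewrite author's own statement) =====
-- stated objective: alternative
-- what changed: A makes one pass maintaining three parallel accumulators (unique list, origins dict, seen set) and rescans unique_tasks to patch origins on every duplicate; B is two staged passes over different data: pass 1 dedupes the flattened (story, task) pairs by normalized key to get unique_tasks, pass 2 builds task_origins from scratch by filtering, for each unique task, a precomputed list of (story, normalized-key-set) pairs.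
import Mathlib
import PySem

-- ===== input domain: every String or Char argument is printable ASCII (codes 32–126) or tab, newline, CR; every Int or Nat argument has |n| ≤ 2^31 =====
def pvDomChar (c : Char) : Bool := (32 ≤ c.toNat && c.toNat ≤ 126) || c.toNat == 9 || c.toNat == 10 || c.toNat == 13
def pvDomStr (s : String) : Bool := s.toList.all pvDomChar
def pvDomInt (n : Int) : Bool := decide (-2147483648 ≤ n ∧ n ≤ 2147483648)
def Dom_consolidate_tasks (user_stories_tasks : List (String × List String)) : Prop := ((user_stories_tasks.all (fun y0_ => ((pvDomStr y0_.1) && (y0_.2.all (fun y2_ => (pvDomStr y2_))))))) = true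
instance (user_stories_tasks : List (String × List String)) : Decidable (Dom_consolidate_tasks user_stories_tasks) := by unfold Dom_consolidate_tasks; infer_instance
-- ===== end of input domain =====

-- B replaces A's single pass over three parallel accumulators (unique list, origins
-- dict, seen set, with an inner rescan on duplicates) by two staged passes: first
-- dedupe the flattened (story, task) pairs by normalized key, then rebuild each
-- unique task's origin list from scratch by filtering the story list (objective:
-- alternative — a different decomposition of similar cost; neither function mutates
-- its argument).
set_option maxHeartbeats 1000000


-- ===== PORT A =====
-- the inner 'for existing_task in unique_tasks: … break' loop of A
def pvScanOrigins (uts : List String) (key story : String)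
    (origins : PySem.Dict String (List String)) : PySem.Dict String (List String) :=
  match uts with
  | [] => origins
  | t :: rest =>
    if PySem.Str.strip (PySem.Str.lower t) = key then
      if (origins.getD t []).contains story then origins
      else origins.insert t (origins.getD t [] ++ [story])
    else pvScanOrigins rest key story origins

-- body of A's inner loop over 'tasks' (state = (unique_tasks, task_origins, seen_tasks))
def pvStepA (story : String)
    (st : List String × PySem.Dict String (List String) × PySem.Set String)
    (task : String) : List String × PySem.Dict String (List String) × PySem.Set String :=
  let key := PySem.Str.strip (PySem.Str.lower task)
  if PySem.Set.contains st.2.2 key = false then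
    (st.1 ++ [task], st.2.1.insert task [story], PySem.Set.add st.2.2 key)
  else
    (st.1, pvScanOrigins st.1 key story st.2.1, st.2.2)

def consolidate_tasks (user_stories_tasks : List (String × List String)) : List String × (List (String × List String)) :=
  let fin := user_stories_tasks.foldl
    (fun st p => p.2.foldl (pvStepA p.1) st)
    ([], PySem.Dict.empty, PySem.Set.empty)
  (fin.1, fin.2.1.items)

-- ===== PORT B =====
-- task.lower().strip(), B's normalization
def pvNorm (t : String) : String := PySem.Str.strip (PySem.Str.lower t)

-- B's precomputed (story, normalized-key-set) list
def pvStoryKeys (l : List (String × List String)) : List (String × PySem.Set String) :=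
  l.map (fun p => (p.1, PySem.Set.ofList (p.2.map pvNorm)))

-- B's `origins` helper: the comprehension filtering the precomputed story_keys list
def pvOrigins (l : List (String × List String)) (task : String) : List String :=
  let key := pvNorm task
  ((pvStoryKeys l).filter (fun q => PySem.Set.contains q.2 key)).map (fun q => q.1)

-- body of B's pass-1 dedup loop over the flattened pairs (state = (unique_tasks, seen))
def pvStepU (st : List String × PySem.Set String) (pr : String × String) :
    List String × PySem.Set String :=
  let key := pvNorm pr.2
  if PySem.Set.contains st.2 key = false then (st.1 ++ [pr.2], PySem.Set.add st.2 key)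
  else st

def consolidate_tasks_alt (user_stories_tasks : List (String × List String)) : List String × (List (String × List String)) :=
  let pairs := user_stories_tasks.flatMap (fun p => p.2.map (fun t => (p.1, t)))
  let unique_tasks := (pairs.foldl pvStepU ([], PySem.Set.empty)).1
  let task_origins := unique_tasks.foldl
    (fun d t => d.insert t (pvOrigins user_stories_tasks t)) PySem.Dict.empty
  (unique_tasks, task_origins.items)

-- ===== PRECONDITION & SPEC =====
-- Pre_ excludes association lists with duplicate story keys: a Python dict argument
-- can never contain two equal keys, so such lists represent no input A ever receives.
def Pre_consolidate_tasks (user_stories_tasks : List (String × List String)) : Prop :=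
  (user_stories_tasks.map (fun p => p.1)).Nodup
instance (user_stories_tasks : List (String × List String)) : Decidable (Pre_consolidate_tasks user_stories_tasks) := by unfold Pre_consolidate_tasks; infer_instance

def pvWitness_consolidate_tasks : (List (String × List String)) :=
  [("US1", ["Login", " login "]), ("US2", ["Signup", "LOGIN"])]

def Spec_consolidate_tasks (user_stories_tasks : List (String × List String)) (out : List String × (List (String × List String))) : Prop := out = consolidate_tasks_alt user_stories_tasks
instance (user_stories_tasks : List (String × List String)) (out : List String × (List (String × List String))) : Decidable (Spec_consolidate_tasks user_stories_tasks out) := by unfold Spec_consolidate_tasks; infer_instance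

-- ===== CLAIM (what is proved, stated in full; the proofs are below) =====
def Claim_equal_consolidate_tasks : Prop := ∀ (user_stories_tasks : List (String × List String)), Dom_consolidate_tasks user_stories_tasks → Pre_consolidate_tasks user_stories_tasks → Spec_consolidate_tasks user_stories_tasks (consolidate_tasks user_stories_tasks)

-- ===== LEMMAS AND PROOFS =====

-- proof-side characterisation of B's origins: the direct filter of the story list
def pvOriginsA (l : List (String × List String)) (task : String) : List String :=
  (l.filter (fun p => p.2.any (fun x => pvNorm x == pvNorm task))).map (fun p => p.1)

theorem pvOrigins_eq (l : List (String × List String)) (t : String) :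
    pvOrigins l t = pvOriginsA l t := by
  unfold pvOrigins pvStoryKeys pvOriginsA
  induction l with
  | nil => rfl
  | cons p r ih =>
    simp only [List.map_cons, List.filter_cons]
    have hcond : (PySem.Set.contains (PySem.Set.ofList (p.2.map pvNorm)) (pvNorm t))
        = p.2.any (fun x => pvNorm x == pvNorm t) := by
      rw [Bool.eq_iff_iff]
      simp only [PySem.Set.contains_iff, PySem.Set.mem_ofList, List.mem_map,
        List.any_eq_true, beq_iff_eq]
    rw [hcond]
    split
    · simp only [List.map_cons]
      rw [ih]
    · exact ih

-- invariant coupling A's state, mid-story: `done` stories fully processed, current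
-- story `s` with task prefix `ts` processed
def pvInvI (done : List (String × List String)) (s : String) (ts : List String)
    (st : List String × PySem.Dict String (List String) × PySem.Set String) : Prop :=
  st.2.2 = st.1.map pvNorm ∧
  (st.1.map pvNorm).Nodup ∧
  st.2.1.items = st.1.map (fun t =>
    (t, pvOriginsA done t ++ (if ts.any (fun x => pvNorm x == pvNorm t) then [s] else []))) ∧
  (∀ p ∈ done, ∀ x ∈ p.2, pvNorm x ∈ st.1.map pvNorm) ∧
  (∀ x ∈ ts, pvNorm x ∈ st.1.map pvNorm)

-- invariant between stories
def pvInvD (done : List (String × List String))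
    (st : List String × PySem.Dict String (List String) × PySem.Set String) : Prop :=
  st.2.2 = st.1.map pvNorm ∧
  (st.1.map pvNorm).Nodup ∧
  st.2.1.items = st.1.map (fun t => (t, pvOriginsA done t)) ∧
  (∀ p ∈ done, ∀ x ∈ p.2, pvNorm x ∈ st.1.map pvNorm)

-- A's inner rescan, characterised: it updates exactly the canonical c
theorem pvScan_eq (ts : List String) (key story c : String)
    (origins : PySem.Dict String (List String))
    (hc : c ∈ ts) (hnc : pvNorm c = key)
    (huniq : ∀ t ∈ ts, pvNorm t = key → t = c) :
    pvScanOrigins ts key story origins =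
      (if (origins.getD c []).contains story then origins
       else origins.insert c (origins.getD c [] ++ [story])) := by
  induction ts with
  | nil => cases hc
  | cons t rest ih =>
    unfold pvScanOrigins
    by_cases ht : PySem.Str.strip (PySem.Str.lower t) = key
    · have htc : t = c := huniq t (List.mem_cons_self) ht
      subst htc
      rw [if_pos ht]
    · rw [if_neg ht]
      have hc' : c ∈ rest := by
        rcases List.mem_cons.mp hc with h | h
        · exact absurd (h ▸ hnc) ht
        · exact h
      exact ih hc' (fun t' ht' h' => huniq t' (List.mem_cons_of_mem _ ht') h')

theorem pvStepI (done : List (String × List String)) (s : String) (ts : List String)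
    (x : String) (st : List String × PySem.Dict String (List String) × PySem.Set String)
    (hs : s ∉ done.map (fun p => p.1)) (h : pvInvI done s ts st) :
    pvInvI done s (ts ++ [x]) (pvStepA s st x) := by
  obtain ⟨h1, h2, h3, h4, h5⟩ := h
  have hkeys : st.2.1.items.map (fun q => q.1) = st.1 := by
    rw [h3, List.map_map]; simp [Function.comp_def]
  by_cases hk : pvNorm x ∈ st.1.map pvNorm
  · -- seen: A rescans unique_tasks
    have hseen : PySem.Set.contains st.2.2 (PySem.Str.strip (PySem.Str.lower x)) = true := by
      have : pvNorm x ∈ st.2.2 := by rw [h1]; exact hk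
      exact (PySem.Set.contains_iff _ _).mpr this
    have hA : pvStepA s st x =
        (st.1, pvScanOrigins st.1 (PySem.Str.strip (PySem.Str.lower x)) s st.2.1, st.2.2) := by
      simp only [pvStepA]; rw [hseen]; simp
    obtain ⟨c, hcmem, hck⟩ := List.mem_map.mp hk
    have huniq : ∀ t ∈ st.1, pvNorm t = pvNorm x → t = c := by
      intro t ht hnt
      exact List.inj_on_of_nodup_map h2 ht hcmem (by rw [hnt, hck])
    have hnods : st.1.Nodup := h2.of_map
    have hkeysnod : st.2.1.items.map (fun q => q.1) = st.1 := hkeys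
    have hitemc : (c, pvOriginsA done c ++
        (if ts.any (fun y => pvNorm y == pvNorm c) then [s] else [])) ∈ st.2.1.items := by
      rw [h3]; exact List.mem_map.mpr ⟨c, hcmem, rfl⟩
    have hgetD : st.2.1.getD c [] = pvOriginsA done c ++
        (if ts.any (fun y => pvNorm y == pvNorm c) then [s] else []) :=
      PySem.Dict.getD_of_mem_items st.2.1 hitemc (by
        show (st.2.1.items.map (fun q => q.1)).Nodup
        rw [hkeysnod]; exact hnods) []
    have hsnotdone : s ∉ pvOriginsA done c := by
      intro hmem
      obtain ⟨p, hp, hps⟩ := List.mem_map.mp hmem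
      exact hs (List.mem_map.mpr ⟨p, List.mem_of_mem_filter hp, hps⟩)
    have hscan := pvScan_eq st.1 (PySem.Str.strip (PySem.Str.lower x)) s c st.2.1
      hcmem hck (fun t ht h' => huniq t ht h')
    rw [hA, hscan]
    -- in either branch st.1 and seen are unchanged
    cases hany : ts.any (fun y => pvNorm y == pvNorm c) with
    | true =>
      -- s already present at the end of origins[c]; A leaves everything unchanged
      have hcon : ((st.2.1.getD c []).contains s) = true := by
        rw [hgetD, hany]; simp
      rw [hcon, if_pos rfl]
      refine ⟨h1, h2, ?_, h4, ?_⟩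
      · rw [h3]
        refine (List.map_congr_left ?_)
        intro t ht
        by_cases htc : t = c
        · subst htc
          have : (ts ++ [x]).any (fun y => pvNorm y == pvNorm t) = true := by
            rw [List.any_append]; rw [hany]; rfl
          rw [hany, this]
        · have hneq : (pvNorm x == pvNorm t) = false := by
            simp only [beq_eq_false_iff_ne, ne_eq]
            intro he
            exact htc (huniq t ht he.symm)
          rw [List.any_append]
          simp [hneq]
      · intro y hy
        rcases List.mem_append.mp hy with hy | hy
        · exact h5 y hy
        · simp only [List.mem_singleton] at hy
          subst hy; exact hk
    | false =>
      -- first matching task of story s: A appends s to origins[c]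
      have hcon : ((st.2.1.getD c []).contains s) = false := by
        rw [hgetD, hany]
        simp only [if_neg Bool.false_ne_true, List.append_nil]
        simp only [List.contains_eq_mem, decide_eq_false_iff_not]
        exact hsnotdone
      rw [hcon, if_neg Bool.false_ne_true]
      have hccont : st.2.1.contains c = true :=
        (PySem.Dict.contains_iff_mem_keys st.2.1 c).mpr (by
          show c ∈ st.2.1.items.map (fun q => q.1); rw [hkeys]; exact hcmem)
      have hit := PySem.Dict.items_insert_of_contains st.2.1
        (st.2.1.getD c [] ++ [s]) hccont
      refine ⟨h1, h2, ?_, h4, ?_⟩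
      · show (st.2.1.insert c (st.2.1.getD c [] ++ [s])).items = _
        rw [hit, h3, List.map_map]
        refine List.map_congr_left ?_
        intro t ht
        simp only [Function.comp]
        by_cases htc : t = c
        · subst htc
          rw [if_pos (by simp)]
          have hnew : (ts ++ [x]).any (fun y => pvNorm y == pvNorm t) = true := by
            rw [List.any_append, hany]
            simp [hck]
          rw [hgetD, hany, hnew]
          simp
        · rw [if_neg (by simpa using htc)]
          have hneq : (pvNorm x == pvNorm t) = false := by
            simp only [beq_eq_false_iff_ne, ne_eq]
            intro he
            exact htc (huniq t ht he.symm)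
          rw [List.any_append]
          simp [hneq]
      · intro y hy
        rcases List.mem_append.mp hy with hy | hy
        · exact h5 y hy
        · simp only [List.mem_singleton] at hy
          subst hy; exact hk
  · -- unseen: A appends a fresh canonical
    have hseen : PySem.Set.contains st.2.2 (PySem.Str.strip (PySem.Str.lower x)) = false := by
      cases hiff : PySem.Set.contains st.2.2 (PySem.Str.strip (PySem.Str.lower x)) with
      | false => rfl
      | true =>
        exact absurd (by rw [← h1]; exact (PySem.Set.contains_iff _ _).mp hiff) hk
    have hA : pvStepA s st x =
        (st.1 ++ [x], st.2.1.insert x [s],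
          PySem.Set.add st.2.2 (PySem.Str.strip (PySem.Str.lower x))) := by
      simp only [pvStepA]; rw [hseen]; simp
    rw [hA]
    have hxnot : x ∉ st.1 := fun hx => hk (List.mem_map.mpr ⟨x, hx, rfl⟩)
    have hxcont : st.2.1.contains x = false := by
      cases hcc : st.2.1.contains x with
      | false => rfl
      | true =>
        have : x ∈ st.2.1.items.map (fun q => q.1) :=
          (PySem.Dict.contains_iff_mem_keys st.2.1 x).mp hcc
        rw [hkeys] at this
        exact absurd this hxnot
    have hxset : pvNorm x ∉ st.2.2 := by rw [h1]; exact hk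
    refine ⟨?_, ?_, ?_, ?_, ?_⟩
    · show PySem.Set.add st.2.2 (pvNorm x) = (st.1 ++ [x]).map pvNorm
      rw [PySem.Set.add_of_not_mem hxset, h1, List.map_append, List.map_singleton]
    · rw [List.map_append, List.map_singleton]
      simp only [List.nodup_append, List.nodup_singleton]
      exact ⟨h2, trivial, by simpa [List.disjoint_singleton] using hk⟩
    · show (st.2.1.insert x [s]).items = _
      rw [PySem.Dict.items_insert_of_not_contains st.2.1 [s] hxcont, h3,
        List.map_append, List.map_singleton]
      congr 1
      · refine List.map_congr_left ?_
        intro t ht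
        have hneq : (pvNorm x == pvNorm t) = false := by
          simp only [beq_eq_false_iff_ne, ne_eq]
          intro he
          exact hk (by rw [he]; exact List.mem_map.mpr ⟨t, ht, rfl⟩)
        rw [List.any_append]
        simp [hneq]
      · -- the fresh canonical: no earlier story matches it
        have hdone : pvOriginsA done x = [] := by
          have hf : List.filter (fun p => p.2.any (fun y => pvNorm y == pvNorm x)) done = [] := by
            refine List.filter_eq_nil_iff.mpr ?_
            intro p hp
            simp only [List.any_eq_true]
            rintro ⟨y, hy, hyx⟩
            exact hk (by rw [← (beq_iff_eq).mp hyx]; exact h4 p hp y hy)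
          unfold pvOriginsA
          rw [hf]; rfl
        have hnew : (ts ++ [x]).any (fun y => pvNorm y == pvNorm x) = true := by
          rw [List.any_append]; simp
        rw [hdone, hnew]
        simp
    · intro p hp y hy
      rw [List.map_append]
      exact List.mem_append_left _ (h4 p hp y hy)
    · intro y hy
      rw [List.map_append]
      rcases List.mem_append.mp hy with hy | hy
      · exact List.mem_append_left _ (h5 y hy)
      · simp only [List.mem_singleton] at hy
        subst hy
        exact List.mem_append_right _ (by simp)

theorem pvFoldI (done : List (String × List String)) (s : String)
    (hs : s ∉ done.map (fun p => p.1)) (rest ts : List String)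
    (st : List String × PySem.Dict String (List String) × PySem.Set String)
    (h : pvInvI done s ts st) :
    pvInvI done s (ts ++ rest) (rest.foldl (pvStepA s) st) := by
  induction rest generalizing ts st with
  | nil => simpa using h
  | cons x r ih =>
    have := ih (ts ++ [x]) (pvStepA s st x) (pvStepI done s ts x st hs h)
    simpa [List.append_assoc] using this

-- pvInvD with one more fully processed story, from the inner invariant run to completion
theorem pvInnerToD (done : List (String × List String)) (p : String × List String)
    (st : List String × PySem.Dict String (List String) × PySem.Set String)
    (h : pvInvI done p.1 p.2 st) : pvInvD (done ++ [p]) st := by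
  obtain ⟨h1, h2, h3, h4, h5⟩ := h
  refine ⟨h1, h2, ?_, ?_⟩
  · rw [h3]
    refine List.map_congr_left ?_
    intro t ht
    have : pvOriginsA (done ++ [p]) t =
        pvOriginsA done t ++ (if p.2.any (fun x => pvNorm x == pvNorm t) then [p.1] else []) := by
      unfold pvOriginsA
      rw [List.filter_append, List.map_append]
      congr 1
      simp only [List.filter_cons, List.filter_nil]
      split <;> simp
    rw [this]
  · intro q hq y hy
    rcases List.mem_append.mp hq with hq | hq
    · exact h4 q hq y hy
    · simp only [List.mem_singleton] at hq
      subst hq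
      exact h5 y hy

theorem pvFoldD (rest done : List (String × List String))
    (st : List String × PySem.Dict String (List String) × PySem.Set String)
    (h : pvInvD done st)
    (hnd : ((done ++ rest).map (fun p => p.1)).Nodup) :
    pvInvD (done ++ rest)
      (rest.foldl (fun st p => p.2.foldl (pvStepA p.1) st) st) := by
  induction rest generalizing done st with
  | nil => simpa using h
  | cons p r ih =>
    have hs : p.1 ∉ done.map (fun q => q.1) := by
      rw [List.map_append, List.nodup_append] at hnd
      intro hmem
      exact hnd.2.2 p.1 hmem p.1 (by simp) rfl
    have h0 : pvInvI done p.1 [] st := by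
      obtain ⟨h1, h2, h3, h4⟩ := h
      exact ⟨h1, h2, by simpa using h3, h4, by simp⟩
    have hI := pvFoldI done p.1 hs p.2 [] st h0
    simp only [List.nil_append] at hI
    have hD := pvInnerToD done p _ hI
    have := ih (done ++ [p]) _ hD (by simpa using hnd)
    simpa using this

-- the dedup pass of B is the (unique_tasks, seen) projection of A's loop
theorem pvProj_step (s : String)
    (st : List String × PySem.Dict String (List String) × PySem.Set String) (x : String) :
    ((pvStepA s st x).1, (pvStepA s st x).2.2) = pvStepU (st.1, st.2.2) (s, x) := by
  simp only [pvStepA, pvStepU, pvNorm]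
  split <;> rfl

theorem pvProj_inner (s : String) (ts : List String)
    (st : List String × PySem.Dict String (List String) × PySem.Set String) :
    ((ts.foldl (pvStepA s) st).1, (ts.foldl (pvStepA s) st).2.2)
      = (ts.map (fun t => (s, t))).foldl pvStepU (st.1, st.2.2) := by
  induction ts generalizing st with
  | nil => rfl
  | cons x r ih =>
    rw [List.map_cons, List.foldl_cons, List.foldl_cons, ← pvProj_step]
    exact ih _

theorem pvProj_outer (l : List (String × List String))
    (st : List String × PySem.Dict String (List String) × PySem.Set String) :
    (((l.foldl (fun st p => p.2.foldl (pvStepA p.1) st) st)).1,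
      ((l.foldl (fun st p => p.2.foldl (pvStepA p.1) st) st)).2.2)
      = (l.flatMap (fun p => p.2.map (fun t => (p.1, t)))).foldl pvStepU (st.1, st.2.2) := by
  induction l generalizing st with
  | nil => rfl
  | cons p r ih =>
    simp only [List.flatMap_cons, List.foldl_append, List.foldl_cons]
    rw [← pvProj_inner]
    exact ih _

-- ===== VERDICT (by name: the statement is the Claim_ definition above) =====
theorem consolidate_tasks_spec : Claim_equal_consolidate_tasks := by
  intro l _ hPre
  unfold Spec_consolidate_tasks consolidate_tasks consolidate_tasks_alt
  have hinit : pvInvD [] ([], PySem.Dict.empty, PySem.Set.empty) := by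
    refine ⟨rfl, by simp, rfl, ?_⟩
    intro p hp; simp at hp
  have hfin := pvFoldD l [] _ hinit (by simpa using hPre)
  simp only [List.nil_append] at hfin
  obtain ⟨h1, h2, h3, h4⟩ := hfin
  set fin := l.foldl (fun st p => p.2.foldl (pvStepA p.1) st)
    ([], PySem.Dict.empty, PySem.Set.empty) with hfindef
  have hproj := pvProj_outer l ([], PySem.Dict.empty, PySem.Set.empty)
  have hU : fin.1 = (List.foldl pvStepU ([], PySem.Set.empty)
      (l.flatMap (fun p => p.2.map (fun t => (p.1, t))))).1 := congrArg Prod.fst hproj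
  have hnodup : fin.1.Nodup := h2.of_map
  have hfold : (List.foldl (fun d t => d.insert t (pvOrigins l t)) PySem.Dict.empty fin.1).items
      = PySem.Dict.empty.items ++ fin.1.map (fun t => (t, pvOrigins l t)) :=
    PySem.Dict.items_foldl_insert_fresh fin.1 (fun t => t)
      (fun t => pvOrigins l t) PySem.Dict.empty
      (fun a _ => PySem.Dict.contains_empty a) (by simpa using hnodup)
  refine Prod.ext ?_ ?_
  · exact hU
  · show fin.2.1.items = (List.foldl (fun d t => d.insert t (pvOrigins l t)) PySem.Dict.empty
      ((List.foldl pvStepU ([], PySem.Set.empty)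
        (l.flatMap (fun p => p.2.map (fun t => (p.1, t))))).1)).items
    rw [← hU, hfold, h3]
    show List.map (fun t => (t, pvOriginsA l t)) fin.1
      = [] ++ List.map (fun t => (t, pvOrigins l t)) fin.1
    rw [List.nil_append]
    exact (List.map_congr_left (fun t _ => by rw [pvOrigins_eq])).symm
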